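-- pv_equiv track=rewrite | github.com/daniel-reich/turbo-robot | qosZ7W2qppFo7MhNB_15.py | hex_distance
-- ===== SOURCE A (Python) =====
-- def hex_distance(grid):
--     coords = []
--     for i in range(len(grid)):
--         if grid[i].count('x') == 2:
--             return (grid[i].rindex('x') - grid[i].index('x'))//2
--         if 'x' in grid[i]:
--             coords.append((i, grid[i].index('x')))
--     (y1, x1), (y2, x2) = coords
--     if x2 == x1:
--         return y2 - y1
--     moves = 0
--     while y1 < y2:
--         x1 = x1 + 1 if x2 >= x1 else x1 - 1
--         y1 += 1
--         moves += 1
--     return moves if x2 == x1 else moves + abs(x2 - x1)//2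
-- ===== SOURCE B (Python) =====
-- def hex_distance(grid):
--     coords = []
--     for i, row in enumerate(grid):
--         xs = [j for j, c in enumerate(row) if c == 'x']
--         if len(xs) == 2:
--             return (xs[1] - xs[0]) // 2
--         if xs:
--             coords.append((i, xs[0]))
--     (y1, x1), (y2, x2) = coords
--     dy = y2 - y1
--     adx = abs(x2 - x1)
--     return dy if adx <= dy else dy + (adx - dy) // 2
-- ===== Notes on version B (the rewrite author's own statement) =====
-- stated objective: simpler
-- what changed: Each row's marker columns are gathered once with an enumerate comprehension instead of separate count/index/rindex scans, and the step-by-step while-loop walk between the two markers is replaced by the closed-form hex distance dy if |dx|<=dy else dy+(|dx|-dy)//2.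
import Mathlib
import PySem

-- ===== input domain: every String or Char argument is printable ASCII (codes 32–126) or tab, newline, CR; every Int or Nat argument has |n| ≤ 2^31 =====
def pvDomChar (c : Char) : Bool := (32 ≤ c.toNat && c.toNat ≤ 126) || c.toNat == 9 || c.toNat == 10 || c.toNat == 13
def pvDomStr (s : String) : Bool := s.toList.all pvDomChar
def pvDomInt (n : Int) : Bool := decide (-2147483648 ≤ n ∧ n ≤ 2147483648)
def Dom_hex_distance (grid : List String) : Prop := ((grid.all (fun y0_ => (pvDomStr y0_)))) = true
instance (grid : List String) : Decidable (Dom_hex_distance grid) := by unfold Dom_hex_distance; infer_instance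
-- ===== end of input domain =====

-- B gathers each row's marker columns once (an enumerate comprehension) instead of A's count/index/rindex
-- scans, and replaces A's step-by-step while-loop walk with the closed-form hex distance.

-- ===== PORT A =====
-- the for-loop over range(len(grid)): early `return` becomes Sum.inl, falling off the loop Sum.inr coords.
-- grid[i].index('x') is ported as PySem.Str.find: exact because it is only evaluated when 'x' is in the row;
-- grid[i].rindex('x') is ported as PySem.Str.rfind: exact because count = 2 guarantees presence.
def scanA (rows : List String) (i : Int) (coords : List (Int × Int)) : Sum Int (List (Int × Int)) :=
  match rows with
  | [] => Sum.inr coords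
  | r :: rs =>
    if PySem.Str.count r "x" = 2 then
      Sum.inl (PySem.Int.floordiv (PySem.Str.rfind r "x" - PySem.Str.find r "x") 2)
    else if PySem.Str.isIn "x" r then
      scanA rs (i + 1) (coords ++ [(i, PySem.Str.find r "x")])
    else
      scanA rs (i + 1) coords

-- the `while y1 < y2` loop; afterwards the final `return moves if x2 == x1 else moves + abs(x2-x1)//2`
def loopA (x1 x2 y1 y2 moves : Int) : Int :=
  if h : y1 < y2 then
    loopA (if x2 ≥ x1 then x1 + 1 else x1 - 1) x2 (y1 + 1) y2 (moves + 1)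
  else if x2 = x1 then moves else moves + PySem.Int.floordiv |x2 - x1| 2
termination_by (y2 - y1).toNat
decreasing_by omega

def hex_distance (grid : List String) : Int :=
  match scanA grid 0 [] with
  | Sum.inl r => r
  | Sum.inr coords =>
    match coords with
    | [(y1, x1), (y2, x2)] =>
      if x2 = x1 then y2 - y1 else loopA x1 x2 y1 y2 0
    | _ => 0   -- ValueError on the tuple unpack: excluded by Pre_hex_distance

-- ===== PORT B =====
-- xs = [j for j, c in enumerate(row) if c == 'x'], as a structural recursion carrying the index j
def xPos (cs : List Char) (j : Nat) : List Nat :=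
  match cs with
  | [] => []
  | c :: t => if c = 'x' then j :: xPos t (j + 1) else xPos t (j + 1)

-- B's for-loop over enumerate(grid); the early `return` is the `some` component
def scanB (rows : List String) (i : Int) (coords : List (Int × Int)) :
    Option Int × List (Int × Int) :=
  match rows with
  | [] => (none, coords)
  | r :: rs =>
    match xPos r.toList 0 with
    | [] => scanB rs (i + 1) coords
    | a :: rest =>
      match rest with
      | [] => scanB rs (i + 1) (coords ++ [(i, (a : Int))])
      | b :: rest2 =>
        match rest2 with
        | [] => (some (PySem.Int.floordiv ((b : Int) - (a : Int)) 2), coords)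
        | _ :: _ => scanB rs (i + 1) (coords ++ [(i, (a : Int))])

def hex_distance_alt (grid : List String) : Int :=
  match scanB grid 0 [] with
  | (o, coords) =>
    match o with
    | some r => r
    | none =>
      -- the tuple unpack (y1, x1), (y2, x2) = coords; other shapes raise ValueError
      -- and are excluded by Pre_hex_distance
      match coords with
      | [] => 0
      | p1 :: t1 =>
        match t1 with
        | [] => 0
        | p2 :: t2 =>
          match t2 with
          | _ :: _ => 0
          | [] =>
            let dy := p2.1 - p1.1
            let adx := |p2.2 - p1.2|
            if adx ≤ dy then dy else dy + PySem.Int.floordiv (adx - dy) 2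

-- ===== PRECONDITION & SPEC =====
-- Pre_ excludes exactly the grids on which A raises ValueError: no row with exactly two 'x'
-- and a number of 'x'-containing rows different from 2 (the tuple unpack of coords fails).
def Pre_hex_distance (grid : List String) : Prop :=
  (∃ r ∈ grid, PySem.Str.count r "x" = 2) ∨
  (grid.filter (fun r => PySem.Str.isIn "x" r)).length = 2
instance (grid : List String) : Decidable (Pre_hex_distance grid) := by
  unfold Pre_hex_distance; infer_instance

def pvWitness_hex_distance : List String := [".x..", "....", "...x"]

def Spec_hex_distance (grid : List String) (out : Int) : Prop := out = hex_distance_alt grid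
instance (grid : List String) (out : Int) : Decidable (Spec_hex_distance grid out) := by
  unfold Spec_hex_distance; infer_instance

-- ===== CLAIM (what is proved, stated in full; the proofs are below) =====
def Claim_equal_hex_distance : Prop := ∀ (grid : List String), Dom_hex_distance grid → Pre_hex_distance grid → Spec_hex_distance grid (hex_distance grid)

-- ===== LEMMAS AND PROOFS =====

theorem singleton_prefix (c : Char) (l : List Char) : [c] <+: l ↔ l.head? = some c := by
  cases l with
  | nil => simp
  | cons h t => simp [List.cons_prefix_cons, eq_comm]

theorem xPos_shift (cs : List Char) (j : Nat) :
    xPos cs (j + 1) = (xPos cs j).map (· + 1) := by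
  induction cs generalizing j with
  | nil => rfl
  | cons c t ih =>
    simp only [xPos]
    by_cases hc : c = 'x' <;> simp [hc, ih]

theorem xPos_zero_cons (c : Char) (t : List Char) :
    xPos (c :: t) 0 =
      if c = 'x' then 0 :: (xPos t 0).map (· + 1) else (xPos t 0).map (· + 1) := by
  simp only [xPos]
  rw [show (0:Nat)+1 = 0+1 from rfl, xPos_shift]

theorem mem_xPos_zero (cs : List Char) (k : Nat) :
    k ∈ xPos cs 0 ↔ cs[k]? = some 'x' := by
  induction cs generalizing k with
  | nil => simp [xPos]
  | cons c t ih =>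
    rw [xPos_zero_cons]
    by_cases hc : c = 'x' <;>
      cases k with
      | zero => simp [hc]
      | succ m => simp [hc, ih]

theorem xPos_sorted (cs : List Char) : (xPos cs 0).Pairwise (· < ·) := by
  induction cs with
  | nil => simp [xPos]
  | cons c t ih =>
    rw [xPos_zero_cons]
    have hmap : ((xPos t 0).map (· + 1)).Pairwise (· < ·) := by
      rw [List.pairwise_map]
      exact ih.imp (by omega)
    by_cases hc : c = 'x'
    · rw [if_pos hc]
      refine List.pairwise_cons.mpr ⟨?_, hmap⟩
      intro a ha
      rcases List.mem_map.mp ha with ⟨b, _, hb⟩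
      omega
    · rw [if_neg hc]; exact hmap

-- count('x') computes the length of the position list
theorem countgo_xPos (fuel : Nat) : ∀ (cs : List Char) (acc : Nat), cs.length ≤ fuel →
    PySem.Chars.count.go ['x'] fuel cs acc = acc + (xPos cs 0).length := by
  induction fuel with
  | zero =>
    intro cs acc h
    have : cs = [] := List.eq_nil_of_length_eq_zero (by omega)
    subst this
    simp [PySem.Chars.count.go, xPos]
  | succ n ih =>
    intro cs acc h
    cases cs with
    | nil => simp [PySem.Chars.count.go, xPos]
    | cons c t =>
      rw [xPos_zero_cons]
      by_cases hc : c = 'x'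
      · subst hc
        simp only [PySem.Chars.count.go]
        rw [if_pos (by simp [List.isPrefixOf])]
        rw [show List.drop (['x'] : List Char).length ('x' :: t) = t from rfl]
        rw [ih t (acc + 1) (by simpa using h)]
        simp
        omega
      · simp only [PySem.Chars.count.go]
        rw [if_neg (by simp [List.isPrefixOf]; exact fun hcon => hc hcon.symm)]
        rw [ih t acc (by simpa using h)]
        simp [hc]

theorem count_eq_xPos_length (cs : List Char) :
    PySem.Chars.count cs ['x'] = (xPos cs 0).length := by
  have : (['x'] : List Char).isEmpty = false := rfl
  simp only [PySem.Chars.count, this, Bool.false_eq_true, if_false]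
  simpa using countgo_xPos cs.length cs 0 le_rfl

-- 'x' in row ↔ the position list is nonempty
theorem isIn_iff_xPos_ne_nil (cs : List Char) :
    PySem.Chars.isIn ['x'] cs = true ↔ xPos cs 0 ≠ [] := by
  rw [← PySem.Chars.exists_prefix_drop_iff_isIn]
  constructor
  · rintro ⟨j, hj⟩
    rw [singleton_prefix, List.head?_drop] at hj
    have : j ∈ xPos cs 0 := (mem_xPos_zero cs j).mpr hj
    intro h; rw [h] at this; simp at this
  · intro h
    match hx : xPos cs 0 with
    | [] => exact absurd hx h
    | a :: rest =>
      refine ⟨a, ?_⟩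
      rw [singleton_prefix, List.head?_drop]
      exact (mem_xPos_zero cs a).mp (hx ▸ List.mem_cons_self ..)

-- row.index('x') is the head of the position list
theorem find_eq_xPos_head (cs : List Char) (a : Nat) (rest : List Nat)
    (hx : xPos cs 0 = a :: rest) : PySem.Chars.find cs ['x'] = a := by
  have ha : cs[a]? = some 'x' := (mem_xPos_zero cs a).mp (hx ▸ List.mem_cons_self ..)
  have hQa : ['x'] <+: cs.drop a := by rw [singleton_prefix, List.head?_drop]; exact ha
  have hin : PySem.Chars.isIn ['x'] cs = true :=
    (PySem.Chars.exists_prefix_drop_iff_isIn ..).mp ⟨a, hQa⟩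
  have hnn : 0 ≤ PySem.Chars.find cs ['x'] := by
    rw [PySem.Chars.find_nonneg_iff]
    exact (PySem.Chars.isIn_iff_infix ['x'] cs).mp hin
  obtain ⟨hpre, hmin⟩ := PySem.Chars.find_spec hnn
  set f := (PySem.Chars.find cs ['x']).toNat with hf
  have hfP : cs[f]? = some 'x' := by
    rw [← List.head?_drop, ← singleton_prefix]; exact hpre
  have hfmem : f ∈ a :: rest := hx ▸ (mem_xPos_zero cs f).mpr hfP
  have hle : a ≤ f := by
    rcases List.mem_cons.mp hfmem with h | h
    · omega
    · have hpw := xPos_sorted cs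
      rw [hx] at hpw
      exact le_of_lt ((List.pairwise_cons.mp hpw).1 f h)
  have hge : ¬ a < f := fun hlt => hmin a hlt hQa
  have : f = a := by omega
  omega

-- rfind.go finds the greatest index satisfying the prefix test
theorem rfindgo_eq (cs : List Char) (b : Nat) : ∀ (n : Nat), b ≤ n →
    ['x'] <+: cs.drop b → (∀ m, b < m → m ≤ n → ¬ ['x'] <+: cs.drop m) →
    PySem.Chars.rfind.go cs ['x'] n = b := by
  intro n
  induction n with
  | zero =>
    intro hb hQ _
    have : b = 0 := by omega
    subst this
    simp only [PySem.Chars.rfind.go]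
    rw [if_pos (by simpa using hQ)]
    simp
  | succ j ih =>
    intro hb hQ hmax
    by_cases he : b = j + 1
    · subst he
      simp only [PySem.Chars.rfind.go]
      rw [if_pos (by simpa using hQ)]
    · have hbj : b ≤ j := by omega
      have hnot : ¬ ['x'] <+: cs.drop (j + 1) := hmax (j + 1) (by omega) le_rfl
      simp only [PySem.Chars.rfind.go]
      rw [if_neg (by simpa using hnot)]
      exact ih hbj hQ (fun m h1 h2 => hmax m h1 (by omega))

-- row.rindex('x') is the second element when the row has exactly two 'x'
theorem rfind_eq_xPos_snd (cs : List Char) (a b : Nat)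
    (hx : xPos cs 0 = [a, b]) : PySem.Chars.rfind cs ['x'] = b := by
  have hmemQ : ∀ k : Nat, cs[k]? = some 'x' ↔ (k = a ∨ k = b) := by
    intro k
    rw [← mem_xPos_zero, hx]; simp
  have hab : a < b := by
    have hpw := xPos_sorted cs
    rw [hx] at hpw
    simpa using (List.pairwise_cons.mp hpw).1 b (by simp)
  have hbP : cs[b]? = some 'x' := (hmemQ b).mpr (Or.inr rfl)
  have hblen : b < cs.length := by
    by_contra h
    rw [List.getElem?_eq_none (by omega)] at hbP
    simp at hbP
  have hQb : ['x'] <+: cs.drop b := by rw [singleton_prefix, List.head?_drop]; exact hbP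
  simp only [PySem.Chars.rfind]
  rw [rfindgo_eq cs b cs.length (by omega) hQb]
  intro m h1 _ hQm
  rw [singleton_prefix, List.head?_drop] at hQm
  rcases (hmemQ m).mp hQm with h | h <;> omega

-- bridge the four per-row facts to the String level ("x".toList = ['x'])
theorem str_count_eq (r : String) : PySem.Str.count r "x" = (xPos r.toList 0).length := by
  rw [PySem.Str.count_eq, show ("x" : String).toList = ['x'] from rfl]
  exact count_eq_xPos_length r.toList

theorem str_isIn_iff (r : String) : PySem.Str.isIn "x" r = true ↔ xPos r.toList 0 ≠ [] := by
  rw [PySem.Str.isIn_eq, show ("x" : String).toList = ['x'] from rfl]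
  exact isIn_iff_xPos_ne_nil r.toList

theorem str_find_eq (r : String) (a : Nat) (rest : List Nat)
    (hx : xPos r.toList 0 = a :: rest) : PySem.Str.find r "x" = a := by
  rw [PySem.Str.find_eq, show ("x" : String).toList = ['x'] from rfl]
  exact find_eq_xPos_head r.toList a rest hx

theorem str_rfind_eq (r : String) (a b : Nat)
    (hx : xPos r.toList 0 = [a, b]) : PySem.Str.rfind r "x" = b := by
  rw [PySem.Str.rfind_eq, show ("x" : String).toList = ['x'] from rfl]
  exact rfind_eq_xPos_snd r.toList a b hx

-- the two scans agree: same early return, same collected coordinates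
theorem scan_rel (rows : List String) : ∀ (i : Int) (coords : List (Int × Int)),
    (∀ r, scanA rows i coords = Sum.inl r → (scanB rows i coords).1 = some r) ∧
    (∀ out, scanA rows i coords = Sum.inr out → scanB rows i coords = (none, out)) := by
  induction rows with
  | nil =>
    intro i coords
    constructor
    · intro r h; simp [scanA] at h
    · intro out h
      simp only [scanA] at h
      cases h; rfl
  | cons r rs ih =>
    intro i coords
    match hx : xPos r.toList 0 with
    | [a, b] =>
      have hc : PySem.Str.count r "x" = 2 := by rw [str_count_eq, hx]; rfl
      have hf := str_find_eq r a [b] hx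
      have hrf := str_rfind_eq r a b hx
      constructor
      · intro v h
        simp only [scanA] at h
        rw [if_pos hc] at h
        cases h
        simp only [scanB, hx, hf, hrf]
      · intro out h
        simp only [scanA] at h
        rw [if_pos hc] at h
        simp at h
    | [] =>
      have hc : PySem.Str.count r "x" ≠ 2 := by rw [str_count_eq, hx]; simp
      have hin : ¬ (PySem.Str.isIn "x" r = true) :=
        fun hcon => ((str_isIn_iff r).mp hcon) hx
      constructor
      · intro v h
        simp only [scanA, if_neg hc, if_neg hin] at h
        simp only [scanB, hx]
        exact (ih (i + 1) coords).1 v h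
      · intro out h
        simp only [scanA, if_neg hc, if_neg hin] at h
        simp only [scanB, hx]
        exact (ih (i + 1) coords).2 out h
    | a :: c :: d :: rest =>
      have hc : PySem.Str.count r "x" ≠ 2 := by rw [str_count_eq, hx]; simp
      have hin : PySem.Str.isIn "x" r = true := by rw [str_isIn_iff, hx]; simp
      have hf := str_find_eq r a (c :: d :: rest) hx
      constructor
      · intro v h
        simp only [scanA, if_neg hc, if_pos hin, hf] at h
        simp only [scanB, hx]
        exact (ih (i + 1) (coords ++ [(i, (a : Int))])).1 v h
      · intro out h
        simp only [scanA, if_neg hc, if_pos hin, hf] at h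
        simp only [scanB, hx]
        exact (ih (i + 1) (coords ++ [(i, (a : Int))])).2 out h
    | [a] =>
      have hc : PySem.Str.count r "x" ≠ 2 := by rw [str_count_eq, hx]; simp
      have hin : PySem.Str.isIn "x" r = true := by rw [str_isIn_iff, hx]; simp
      have hf := str_find_eq r a [] hx
      constructor
      · intro v h
        simp only [scanA, if_neg hc, if_pos hin, hf] at h
        simp only [scanB, hx]
        exact (ih (i + 1) (coords ++ [(i, (a : Int))])).1 v h
      · intro out h
        simp only [scanA, if_neg hc, if_pos hin, hf] at h
        simp only [scanB, hx]
        exact (ih (i + 1) (coords ++ [(i, (a : Int))])).2 out h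

-- the row indices collected by A's scan are strictly increasing
theorem scanA_pairwise (rows : List String) (i : Int) (coords : List (Int × Int))
    (hlt : ∀ p ∈ coords, p.1 < i)
    (hpw : coords.Pairwise (fun a b => a.1 < b.1))
    {out : List (Int × Int)} (h : scanA rows i coords = Sum.inr out) :
    out.Pairwise (fun a b => a.1 < b.1) := by
  induction rows generalizing i coords with
  | nil =>
    simp only [scanA] at h
    cases h; exact hpw
  | cons r rs ih =>
    simp only [scanA] at h
    split at h
    · cases h
    · split at h
      · refine ih (i + 1) (coords ++ [(i, PySem.Str.find r "x")]) ?_ ?_ h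
        · intro p hp
          rcases List.mem_append.mp hp with hp | hp
          · have := hlt p hp; omega
          · simp only [List.mem_singleton] at hp; subst hp; simp
        · refine List.pairwise_append.mpr ⟨hpw, List.pairwise_singleton _ _, ?_⟩
          intro a ha b hb
          simp only [List.mem_singleton] at hb
          subst hb
          exact hlt a ha
      · exact ih (i + 1) coords (fun p hp => by have := hlt p hp; omega) hpw h

-- closed form of A's while loop
theorem loopA_eq (n : Nat) : ∀ (x1 x2 y1 moves : Int),
    loopA x1 x2 y1 (y1 + n) moves =
      moves + n + (if |x2 - x1| ≤ (n : Int) then 0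
                   else PySem.Int.floordiv (|x2 - x1| - n) 2) := by
  induction n with
  | zero =>
    intro x1 x2 y1 moves
    rw [loopA]
    simp only [Int.natCast_zero, add_zero]
    have : ¬ y1 < y1 := lt_irrefl y1
    rw [dif_neg this]
    by_cases hx : x2 = x1
    · simp [hx]
    · have h0 : ¬ |x2 - x1| ≤ (0 : Int) := by
        simp [abs_nonpos_iff, sub_eq_zero]; exact hx
      rw [if_neg hx, if_neg h0, sub_zero]
  | succ n ih =>
    intro x1 x2 y1 moves
    rw [loopA]
    rw [dif_pos (by push_cast; omega)]
    have harg : y1 + ((n : Nat) + 1 : Nat) = (y1 + 1) + (n : Nat) := by push_cast; omega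
    rw [harg, ih]
    by_cases hx : x2 ≥ x1
    · rw [if_pos hx]
      by_cases he : x2 = x1
      · -- x1 overshoots: |x2 - (x1+1)| = 1
        subst he
        simp only [sub_add_cancel_left, abs_neg, abs_one, sub_self, abs_zero]
        by_cases hn : (1 : Int) ≤ (n : Int)
        · rw [if_pos hn, if_pos (by positivity)]
          push_cast; ring
        · have hn0 : n = 0 := by omega
          subst hn0
          rw [if_neg hn, if_pos (by norm_num), show ((1:Int) - (0:Nat)) = 1 by norm_num,
              show PySem.Int.floordiv 1 2 = 0 from by decide]
          push_cast; ring
      · have hgt : x1 < x2 := lt_of_le_of_ne hx (fun h => he h.symm)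
        have h1 : |x2 - (x1 + 1)| = |x2 - x1| - 1 := by
          rw [abs_of_nonneg (by omega), abs_of_nonneg (by omega)]; ring
        rw [h1]
        by_cases hc : |x2 - x1| - 1 ≤ (n : Int)
        · rw [if_pos hc, if_pos (by push_cast; omega)]; push_cast; ring
        · rw [if_neg hc, if_neg (by push_cast; omega)]
          have : |x2 - x1| - 1 - (n : Int) = |x2 - x1| - ((n : Nat) + 1 : Nat) := by
            push_cast; ring
          rw [this]; push_cast; ring
    · rw [if_neg hx]
      have hgt : x2 < x1 := lt_of_not_ge hx
      have h1 : |x2 - (x1 - 1)| = |x2 - x1| - 1 := by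
        rw [abs_of_nonpos (by omega), abs_of_nonpos (by omega)]; ring
      rw [h1]
      by_cases hc : |x2 - x1| - 1 ≤ (n : Int)
      · rw [if_pos hc, if_pos (by push_cast; omega)]; push_cast; ring
      · rw [if_neg hc, if_neg (by push_cast; omega)]
        have : |x2 - x1| - 1 - (n : Int) = |x2 - x1| - ((n : Nat) + 1 : Nat) := by
          push_cast; ring
        rw [this]; push_cast; ring

-- ===== VERDICT (by name: the statement is the Claim_ definition above) =====
theorem hex_distance_spec : Claim_equal_hex_distance := by
  intro grid _ _
  unfold Spec_hex_distance hex_distance hex_distance_alt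
  cases hscan : scanA grid 0 [] with
  | inl r =>
    have hB : (scanB grid 0 []).1 = some r := (scan_rel grid 0 []).1 r hscan
    rcases hsb : scanB grid 0 [] with ⟨o, cs⟩
    rw [hsb] at hB
    simp only at hB
    subst hB
    rfl
  | inr coords =>
    have hB : scanB grid 0 [] = (none, coords) := (scan_rel grid 0 []).2 coords hscan
    rw [hB]
    match coords with
    | [] => rfl
    | [_] => rfl
    | (y1, x1) :: (y2, x2) :: p :: rest => rfl
    | [(y1, x1), (y2, x2)] =>
      simp only
      have hpw := scanA_pairwise grid 0 [] (by simp) (by simp) hscan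
      have hy : y1 < y2 := by
        have := List.pairwise_cons.mp hpw
        simpa using this.1 (y2, x2) (by simp)
      by_cases hx : x2 = x1
      · rw [if_pos hx]
        have : |x2 - x1| ≤ y2 - y1 := by
          rw [hx]; simp; omega
        rw [if_pos this]
      · rw [if_neg hx]
        have hl := loopA_eq (y2 - y1).toNat x1 x2 y1 0
        rw [show y1 + (((y2 - y1).toNat : Nat) : Int) = y2 by omega,
            show (((y2 - y1).toNat : Nat) : Int) = y2 - y1 by omega] at hl
        rw [hl]
        by_cases hc : |x2 - x1| ≤ y2 - y1
        · rw [if_pos hc, if_pos hc]; ring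
        · rw [if_neg hc, if_neg hc]; ring
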